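-- pv_equiv track=rewrite | github.com/PkKeo/GoldenCorpus | find.py | map_position
-- ===== SOURCE A (Python) =====
-- def map_position(processed_text, correct_text, processed_pos):
--     p_idx = c_idx = 0
--     while p_idx < processed_pos and p_idx < len(processed_text) and c_idx < len(correct_text):
--         if processed_text[p_idx].isspace():
--             p_idx += 1
--             continue
--         if correct_text[c_idx].isspace():
--             c_idx += 1
--             continue
--         p_idx += 1
--         c_idx += 1
--     return c_idx
-- ===== SOURCE B (Python) =====
-- def map_position(processed_text, correct_text, processed_pos):
--     # Phase 1: count non-whitespace characters of processed_text before processed_pos.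
--     n = 0
--     p = 0
--     while p < processed_pos and p < len(processed_text):
--         if not processed_text[p].isspace():
--             n += 1
--         p += 1
--     # Phase 2: advance through correct_text, skipping whitespace, consuming n non-whitespace chars.
--     c = 0
--     while n > 0 and c < len(correct_text):
--         if not correct_text[c].isspace():
--             n -= 1
--         c += 1
--     return c
-- ===== Notes on version B (the rewrite author's own statement) =====
-- stated objective: simpler
-- what changed: Replaced A's single interleaved two-pointer while loop over both strings with two independent passes: first count the non-whitespace characters of processed_text before processed_pos, then walk correct_text skipping whitespace until that many non-whitespace characters are consumed.
import Mathlib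
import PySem

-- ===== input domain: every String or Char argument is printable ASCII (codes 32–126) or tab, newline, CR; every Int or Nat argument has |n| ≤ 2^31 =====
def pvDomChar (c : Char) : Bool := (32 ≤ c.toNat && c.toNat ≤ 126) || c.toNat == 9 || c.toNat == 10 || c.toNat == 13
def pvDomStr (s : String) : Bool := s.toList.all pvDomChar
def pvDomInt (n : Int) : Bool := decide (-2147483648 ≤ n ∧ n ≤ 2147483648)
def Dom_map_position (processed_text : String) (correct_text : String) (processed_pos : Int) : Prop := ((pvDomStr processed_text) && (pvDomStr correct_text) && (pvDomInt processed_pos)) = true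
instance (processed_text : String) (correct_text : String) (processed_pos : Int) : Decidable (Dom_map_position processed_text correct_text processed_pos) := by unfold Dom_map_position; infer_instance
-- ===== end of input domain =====

-- B replaces A's interleaved two-pointer while loop by two independent passes (count, then walk); objective: simpler.

-- ===== PORT A =====
-- the while loop of A: two indices advance together, whitespace on either side skipped
def pvLoopA (ps cs : List Char) (pos : Int) (p c : Nat) : Nat :=
  if h : (p : Int) < pos ∧ p < ps.length ∧ c < cs.length then
    if PySem.Chars.isspace ps[p] then
      pvLoopA ps cs pos (p + 1) c
    else if PySem.Chars.isspace cs[c] then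
      pvLoopA ps cs pos p (c + 1)
    else
      pvLoopA ps cs pos (p + 1) (c + 1)
  else c
termination_by (ps.length - p) + (cs.length - c)
decreasing_by all_goals omega

def map_position (processed_text : String) (correct_text : String) (processed_pos : Int) : Int :=
  (pvLoopA processed_text.toList correct_text.toList processed_pos 0 0 : Int)

-- ===== PORT B =====
-- phase 1 of B: count the non-whitespace characters of processed_text before processed_pos
def pvCountB (ps : List Char) (pos : Int) (p n : Nat) : Nat :=
  if h : (p : Int) < pos ∧ p < ps.length then
    pvCountB ps pos (p + 1) (if PySem.Chars.isspace ps[p] then n else n + 1)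
  else n
termination_by ps.length - p
decreasing_by omega

-- phase 2 of B: walk correct_text consuming n non-whitespace characters
def pvWalkB (cs : List Char) (n c : Nat) : Nat :=
  if h : 0 < n ∧ c < cs.length then
    pvWalkB cs (if PySem.Chars.isspace cs[c] then n else n - 1) (c + 1)
  else c
termination_by cs.length - c
decreasing_by omega

def map_position_alt (processed_text : String) (correct_text : String) (processed_pos : Int) : Int :=
  (pvWalkB correct_text.toList (pvCountB processed_text.toList processed_pos 0 0) 0 : Int)

-- ===== PRECONDITION & SPEC =====
def Spec_map_position (processed_text : String) (correct_text : String) (processed_pos : Int) (out : Int) : Prop := out = map_position_alt processed_text correct_text processed_pos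
instance (processed_text : String) (correct_text : String) (processed_pos : Int) (out : Int) : Decidable (Spec_map_position processed_text correct_text processed_pos out) := by unfold Spec_map_position; infer_instance

-- ===== CLAIM (what is proved, stated in full; the proofs are below) =====
def Claim_equal_map_position : Prop := ∀ (processed_text : String) (correct_text : String) (processed_pos : Int), Dom_map_position processed_text correct_text processed_pos → Spec_map_position processed_text correct_text processed_pos (map_position processed_text correct_text processed_pos)

-- ===== LEMMAS AND PROOFS =====

-- accumulator law for phase 1 of B
theorem pvCountB_acc (ps : List Char) (pos : Int) :
    ∀ fuel p n, ps.length - p ≤ fuel → pvCountB ps pos p n = n + pvCountB ps pos p 0 := by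
  intro fuel
  induction fuel with
  | zero =>
    intro p n hf
    rw [pvCountB, pvCountB, dif_neg (by omega), dif_neg (by omega)]; omega
  | succ k ih =>
    intro p n hf
    by_cases h : (p : Int) < pos ∧ p < ps.length
    · rw [pvCountB, pvCountB, dif_pos h, dif_pos h]
      rw [ih (p + 1) _ (by omega), ih (p + 1) (if PySem.Chars.isspace ps[p] then 0 else 0 + 1) (by omega)]
      split <;> omega
    · rw [pvCountB, pvCountB, dif_neg h, dif_neg h]; omega

-- whitespace in processed_text does not change the count
theorem pvCountB_skip (ps : List Char) (pos : Int) (p : Nat) (h1 : (p : Int) < pos)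
    (h2 : p < ps.length) (hs : PySem.Chars.isspace ps[p] = true) :
    pvCountB ps pos p 0 = pvCountB ps pos (p + 1) 0 := by
  rw [pvCountB, dif_pos ⟨h1, h2⟩, if_pos hs]

-- a non-whitespace char in range contributes one to the count
theorem pvCountB_take (ps : List Char) (pos : Int) (p : Nat) (h1 : (p : Int) < pos)
    (h2 : p < ps.length) (hs : ¬ PySem.Chars.isspace ps[p] = true) :
    pvCountB ps pos p 0 = pvCountB ps pos (p + 1) 0 + 1 := by
  rw [pvCountB, dif_pos ⟨h1, h2⟩, if_neg hs,
    pvCountB_acc ps pos (ps.length - (p + 1)) (p + 1) (0 + 1) le_rfl]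
  omega

-- the heart: A's interleaved loop equals B's walk applied to B's count, from any loop state
theorem pvLoopA_eq_walk (ps cs : List Char) (pos : Int) (p c : Nat) :
    pvLoopA ps cs pos p c = pvWalkB cs (pvCountB ps pos p 0) c := by
  induction p, c using pvLoopA.induct ps cs pos with
  | case1 p c h hsp ih =>
    -- processed_text[p] is whitespace: p advances, count unchanged
    rw [pvLoopA, dif_pos h, if_pos hsp, ih, pvCountB_skip ps pos p h.1 h.2.1 hsp]
  | case2 p c h hsp hsc ih =>
    -- correct_text[c] is whitespace: c advances, count positive so the walk also skips it
    rw [pvLoopA, dif_pos h, if_neg hsp, if_pos hsc, ih]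
    have hn : 0 < pvCountB ps pos p 0 := by
      rw [pvCountB_take ps pos p h.1 h.2.1 hsp]; omega
    conv_rhs => rw [pvWalkB, dif_pos ⟨hn, h.2.2⟩, if_pos hsc]
  | case3 p c h hsp hsc ih =>
    -- both non-whitespace: both advance, the walk consumes one unit
    rw [pvLoopA, dif_pos h, if_neg hsp, if_neg hsc, ih,
      pvCountB_take ps pos p h.1 h.2.1 hsp]
    conv_rhs => rw [pvWalkB, dif_pos ⟨by omega, h.2.2⟩, if_neg hsc]
    simp
  | case4 p c h =>
    rw [pvLoopA, dif_neg h]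
    by_cases hp : (p : Int) < pos ∧ p < ps.length
    · have hc : ¬ c < cs.length := by tauto
      rw [pvWalkB, dif_neg (by tauto)]
    · rw [pvCountB, dif_neg hp, pvWalkB, dif_neg (by omega)]

-- ===== VERDICT (by name: the statement is the Claim_ definition above) =====
theorem map_position_spec : Claim_equal_map_position := by
  intro pt ct pos _
  unfold Spec_map_position map_position map_position_alt
  rw [pvLoopA_eq_walk]
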